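-- pv_equiv track=rewrite | github.com/SPbSAT/cirbo | tests/core/truth_table_test.py | generate_out_by_mask
-- ===== SOURCE A (Python) =====
-- import typing as tp
--
-- def generate_sum(
--     input_size: int, negations: tp.Optional[list[bool]] = None
-- ) -> list[bool]:
--     lst = []
--     for i in range(2**input_size):
--         b = bin(i)[2:]  # type: ignore
--         b = '0' * (input_size - len(b)) + b  # type: ignore
--         b = [int(v) for v in b]  # type: ignore
--         if negations is not None:
--             b = [b[i] ^ negations[i] for i in range(len(b))]  # type: ignore
--         s = b.count(1)  # type: ignore
--         lst.append(s > input_size / 2)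
--     return lst
--
-- def generate_out_by_mask(input_size: int, mask: list[int]) -> list[bool]:
--     s = generate_sum(len(mask))
--     out = []
--     for i in range(2**input_size):
--         st = bin(i)[2:]
--         st = '0' * (input_size - len(st)) + st
--         idx = int(''.join([st[j] for j in mask]), 2)
--         out.append(s[idx])
--     return out
-- ===== SOURCE B (Python) =====
-- def generate_out_by_mask(input_size: int, mask: list[int]) -> list[bool]:
--     # For each assignment, count the selected bits directly and take the majority:
--     # no precomputed table, no string joining / base-2 parsing.
--     out = []
--     for i in range(2 ** input_size):
--         st = bin(i)[2:].zfill(input_size)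
--         ones = sum(st[j] == '1' for j in mask)
--         out.append(2 * ones > len(mask))
--     return out
-- ===== Notes on version B (the rewrite author's own statement) =====
-- stated objective: simpler
-- what changed: B drops the precomputed 2^len(mask) majority table (generate_sum) and the join/int(.,2) index construction entirely, counting the selected bits of each assignment directly and comparing against half the mask length; Pre_ excludes exactly the inputs where A raises (negative input_size, empty mask, mask index out of range of the padded bit string).
import Mathlib
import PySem

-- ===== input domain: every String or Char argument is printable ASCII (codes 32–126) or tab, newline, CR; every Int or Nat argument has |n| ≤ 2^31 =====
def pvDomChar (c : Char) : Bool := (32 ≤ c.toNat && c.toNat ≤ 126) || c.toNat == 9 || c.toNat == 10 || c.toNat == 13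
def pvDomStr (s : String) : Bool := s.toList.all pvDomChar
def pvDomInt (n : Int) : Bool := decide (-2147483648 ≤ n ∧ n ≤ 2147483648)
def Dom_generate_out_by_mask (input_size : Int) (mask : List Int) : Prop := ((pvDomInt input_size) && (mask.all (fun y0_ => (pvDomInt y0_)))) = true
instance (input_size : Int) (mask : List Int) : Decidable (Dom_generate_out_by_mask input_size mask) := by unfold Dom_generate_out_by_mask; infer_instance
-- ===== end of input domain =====

-- B drops A's precomputed 2^len(mask) majority table and the join/int(.,2) index
-- construction, counting the selected bits of each assignment directly (objective: simpler).

-- ===== PORT A =====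
-- bin(i)[2:] (MSB-first binary digits; bin(0)[2:] = "0"): hand port, exact
def pyBin (i : Nat) : List Char :=
  if i = 0 then ['0'] else (Nat.digits 2 i).reverse.map (fun d => if d = 1 then '1' else '0')

def generate_sum (input_size : Int) (negations : Option (List Bool)) : List Bool :=
  (List.range (2 ^ input_size.toNat)).foldl (fun lst i =>
    let b := pyBin i
    let b := List.replicate (input_size.toNat - b.length) '0' ++ b
    -- int(v): exact, the chars of b are only '0'/'1'
    let b : List Int := b.map (fun v => if v = '1' then 1 else 0)
    let b := match negations with
      | none => b
      -- b[i] ^ negations[i] on 0/1 ints (A only ever calls with negations = None)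
      | some neg => (List.range b.length).map (fun i =>
          if (b.getD i 0 == 1) != (neg.getD i false) then (1 : Int) else 0)
    let s : Int := b.count 1
    -- s > input_size / 2: exact integer form of the float comparison
    lst ++ [decide (2 * s > input_size)]) []

-- int(''.join(...), 2) for a nonempty '0'/'1' string (the empty string raises ValueError: excluded by Pre_)
def binVal (cs : List Char) : Nat :=
  cs.foldl (fun acc c => 2 * acc + (if c = '1' then 1 else 0)) 0

def generate_out_by_mask (input_size : Int) (mask : List Int) : List Bool :=
  let s := generate_sum (mask.length : Int) none
  (List.range (2 ^ input_size.toNat)).foldl (fun out i =>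
    let st := pyBin i
    let st := List.replicate (input_size.toNat - st.length) '0' ++ st
    -- st[j]: IndexError (pyGet? = none) excluded by Pre_
    let idx := binVal (mask.map (fun j => (PySem.List.pyGet? st j).getD '0'))
    -- s[idx]: idx < 2^len(mask) = len(s) always, so the default is never taken
    out ++ [s.getD idx false]) []

-- ===== PORT B =====
def generate_out_by_mask_alt (input_size : Int) (mask : List Int) : List Bool :=
  (List.range (2 ^ input_size.toNat)).foldl (fun out i =>
    -- bin(i)[2:].zfill(input_size)
    let st := pyBin i
    let st := List.replicate (input_size.toNat - st.length) '0' ++ st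
    -- sum(st[j] == '1' for j in mask); st[j]: IndexError (pyGet? = none) excluded by Pre_
    let ones : Int := mask.foldl (fun a j =>
      a + (if (PySem.List.pyGet? st j).getD '0' = '1' then 1 else 0)) 0
    out ++ [decide (2 * ones > (mask.length : Int))]) []

-- ===== PRECONDITION & SPEC =====
-- Pre_ excludes exactly the inputs on which the Python A raises: negative input_size
-- (range(2**n) receives a float: TypeError), empty mask (int('', 2): ValueError), and mask
-- indices outside the padded binary string of length max(input_size, 1) (IndexError).
def Pre_generate_out_by_mask (input_size : Int) (mask : List Int) : Prop :=
  0 ≤ input_size ∧ mask ≠ [] ∧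
    ∀ j ∈ mask, -(max input_size 1) ≤ j ∧ j < max input_size 1
instance (input_size : Int) (mask : List Int) : Decidable (Pre_generate_out_by_mask input_size mask) := by
  unfold Pre_generate_out_by_mask; infer_instance

def pvWitness_generate_out_by_mask : Int × List Int := (2, [0, -1])

def Spec_generate_out_by_mask (input_size : Int) (mask : List Int) (out : List Bool) : Prop := out = generate_out_by_mask_alt input_size mask
instance (input_size : Int) (mask : List Int) (out : List Bool) : Decidable (Spec_generate_out_by_mask input_size mask out) := by unfold Spec_generate_out_by_mask; infer_instance

-- ===== CLAIM (what is proved, stated in full; the proofs are below) =====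
def Claim_equal_generate_out_by_mask : Prop := ∀ (input_size : Int) (mask : List Int), Dom_generate_out_by_mask input_size mask → Pre_generate_out_by_mask input_size mask → Spec_generate_out_by_mask input_size mask (generate_out_by_mask input_size mask)


-- ===== LEMMAS AND PROOFS =====

def popc (k : Nat) : Nat := (Nat.digits 2 k).count 1

theorem popc_step (a b : Nat) (hb : b < 2) : popc (2 * a + b) = popc a + b := by
  unfold popc
  rcases Nat.eq_zero_or_pos (2 * a + b) with h | h
  · have ha : a = 0 := by omega
    have hb0 : b = 0 := by omega
    simp [ha, hb0]
  · rw [Nat.digits_def' (by norm_num) h]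
    have h1 : (2 * a + b) % 2 = b := by omega
    have h2 : (2 * a + b) / 2 = a := by omega
    rw [h1, h2, List.count_cons]
    interval_cases b <;> simp

theorem binVal_fold_lt (cs : List Char) : ∀ acc : Nat,
    cs.foldl (fun acc c => 2 * acc + (if c = '1' then 1 else 0)) acc < (acc + 1) * 2 ^ cs.length := by
  induction cs with
  | nil => intro acc; simp
  | cons c cs ih =>
    intro acc
    simp only [List.foldl_cons, List.length_cons]
    have := ih (2 * acc + (if c = '1' then 1 else 0))
    have hb : (if c = '1' then 1 else 0) ≤ 1 := by split <;> omega
    calc _ < (2 * acc + (if c = '1' then 1 else 0) + 1) * 2 ^ cs.length := this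
    _ ≤ (acc + 1) * 2 ^ (cs.length + 1) := by rw [pow_succ]; nlinarith [Nat.one_le_two_pow (n := cs.length)]

theorem binVal_lt (cs : List Char) : binVal cs < 2 ^ cs.length := by
  have := binVal_fold_lt cs 0
  simpa [binVal] using this

theorem popc_fold (cs : List Char) : ∀ acc : Nat,
    popc (cs.foldl (fun acc c => 2 * acc + (if c = '1' then 1 else 0)) acc) = popc acc + cs.count '1' := by
  induction cs with
  | nil => intro acc; simp
  | cons c cs ih =>
    intro acc
    simp only [List.foldl_cons, List.count_cons, ih]
    rw [popc_step _ _ (by split <;> omega)]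
    by_cases h : c = '1' <;> simp [h] <;> omega

theorem popc_binVal (cs : List Char) : popc (binVal cs) = cs.count '1' := by
  have := popc_fold cs 0
  simpa [binVal, popc] using this

theorem pad_count (x i : Nat) :
    (List.replicate x '0' ++ pyBin i).count '1' = popc i := by
  rw [List.count_append]
  have h0 : (List.replicate x '0').count '1' = 0 := by
    simp [List.count_replicate]
  rw [h0]
  rcases eq_or_ne i 0 with h | h
  · simp [h, pyBin, popc]
  · rw [show pyBin i = (Nat.digits 2 i).reverse.map (fun d => if d = 1 then '1' else '0') from by
      simp [pyBin, h]]
    rw [List.count_eq_countP, List.countP_map]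
    have : ∀ l : List Nat, List.countP ((fun c => c == '1') ∘ fun d => if d = 1 then '1' else '0') l
        = List.countP (fun d => d == 1) l := by
      intro l
      apply List.countP_congr
      intro d _
      by_cases hd : d = 1 <;> simp [hd]
    rw [this, List.countP_reverse]
    simp [popc, List.count_eq_countP]

theorem foldl_app {α β : Type} (f : α → β) (l : List α) (acc : List β) :
    l.foldl (fun out i => out ++ [f i]) acc = acc ++ l.map f := by
  induction l generalizing acc with
  | nil => simp
  | cons x l ih => simp [ih]

theorem count_map_bit (cs : List Char) :
    (cs.map (fun v => if v = '1' then (1 : Int) else 0)).count 1 = cs.count '1' := by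
  rw [List.count_eq_countP, List.countP_map, List.count_eq_countP]
  apply List.countP_congr
  intro c _
  by_cases h : c = '1' <;> simp [h]

theorem genSum_getD (m k : Nat) (hk : k < 2 ^ m) :
    (generate_sum (m : Int) none).getD k false = decide (2 * (popc k : Int) > (m : Int)) := by
  have he : generate_sum (m : Int) none = (List.range (2 ^ m)).map (fun i =>
      decide (2 * (((List.replicate (m - (pyBin i).length) '0' ++ pyBin i).map
        (fun v => if v = '1' then (1 : Int) else 0)).count 1) > (m : Int))) := by
    unfold generate_sum
    rw [Int.toNat_natCast]
    exact foldl_app _ _ []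
  rw [he, List.getD_eq_getElem _ _ (by simpa using hk), List.getElem_map, List.getElem_range]
  rw [count_map_bit, pad_count]

-- sum(st[j] == '1' for j in mask) counts the '1' entries among the selected characters
theorem foldl_count (f : Int → Char) (mask : List Int) : ∀ acc : Int,
    mask.foldl (fun a j => a + (if f j = '1' then 1 else 0)) acc
      = acc + (((mask.map f).count '1' : Nat) : Int) := by
  induction mask with
  | nil => intro acc; simp
  | cons j mask ih =>
    intro acc
    simp only [List.foldl_cons, List.map_cons, List.count_cons, ih]
    by_cases h : f j = '1' <;> simp [h] <;> push_cast <;> ring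

theorem main (input_size : Int) (mask : List Int) :
    generate_out_by_mask input_size mask = generate_out_by_mask_alt input_size mask := by
  unfold generate_out_by_mask generate_out_by_mask_alt
  rw [foldl_app, foldl_app, List.nil_append, List.nil_append]
  apply List.map_congr_left
  intro i _
  set st := List.replicate (input_size.toNat - (pyBin i).length) '0' ++ pyBin i with hst
  set cs := mask.map (fun j => (PySem.List.pyGet? st j).getD '0') with hcs
  have hlt : binVal cs < 2 ^ mask.length := by
    have := binVal_lt cs
    simpa [hcs, List.length_map] using this
  rw [genSum_getD mask.length (binVal cs) hlt, popc_binVal]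
  rw [foldl_count (fun j => (PySem.List.pyGet? st j).getD '0') mask 0, ← hcs]
  simp

-- ===== VERDICT (by name: the statement is the Claim_ definition above) =====
theorem generate_out_by_mask_spec : Claim_equal_generate_out_by_mask := by
  intro input_size mask _ _
  unfold Spec_generate_out_by_mask
  exact main input_size mask
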